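-- pv_equiv track=rewrite | github.com/leidZhang/Dynamic-GSG | utils/map_objects_utils_up_with_groupv3.py | process_tag_classes
-- ===== SOURCE A (Python) =====
-- def process_tag_classes(text_prompt:str) -> list[str]:
--     '''Convert a text prompt from Tag2Text to a list of classes. '''
--     classes = text_prompt.split('.')
--     classes = [obj_class.strip() for obj_class in classes]
--     classes = [obj_class for obj_class in classes if obj_class != '']
--     add_classes = ["picture","handle", 'Bottled Coke', 'Canned Beer', 'apple', 'potato', 'green toy', 'blue bottle', 'green container', 'blue and grey umbrella', 'blue toy', 'pen', 'orange', 'eggplant', 'yellow bottle', 'corn', 'chili pepper', 'small scissors', 'keys', 'green container', 'cabinet', 'long table', 'big table', 'plate']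
--     remove_classes = [
--         "room", "kitchen", "office", "house", "home", "building", "corner",
--         "shadow", "carpet", "photo", "shade", "stall", "space", "aquarium",
--         "apartment", "image", "city", "blue", "skylight", "hallway",
--         "bureau", "modern", "salon", "doorway", "wall lamp", "wood floor",
--         "floor", "ladder", "sink", "counter top", "hardwood",
--         "shower curtain", "curtain", "slide", "peak", "closet",
--         "man", "woman", "child", "boy", "girl", "person", "human", "drawer"]
--     for c in remove_classes:
--         classes = [obj_class for obj_class in classes if c not in obj_class.lower()]
--     for c in add_classes:
--         if c not in classes:
--             classes.append(c)
--     return classes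
-- ===== SOURCE B (Python) =====
-- def process_tag_classes(text_prompt: str) -> list[str]:
--     '''Convert a text prompt from Tag2Text to a list of classes.'''
--     add_classes = ["picture","handle", 'Bottled Coke', 'Canned Beer', 'apple', 'potato', 'green toy', 'blue bottle', 'green container', 'blue and grey umbrella', 'blue toy', 'pen', 'orange', 'eggplant', 'yellow bottle', 'corn', 'chili pepper', 'small scissors', 'keys', 'green container', 'cabinet', 'long table', 'big table', 'plate']
--     remove_classes = [
--         "room", "kitchen", "office", "house", "home", "building", "corner",
--         "shadow", "carpet", "photo", "shade", "stall", "space", "aquarium",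
--         "apartment", "image", "city", "blue", "skylight", "hallway",
--         "bureau", "modern", "salon", "doorway", "wall lamp", "wood floor",
--         "floor", "ladder", "sink", "counter top", "hardwood",
--         "shower curtain", "curtain", "slide", "peak", "closet",
--         "man", "woman", "child", "boy", "girl", "person", "human", "drawer"]
--     # single character-level scan: tokenize on '.' and filter each token as it is
--     # completed, instead of building and rebuilding whole intermediate lists
--     classes = []
--     tok = []
--     for ch in text_prompt + '.':
--         if ch == '.':
--             t = ''.join(tok).strip()
--             tok = []
--             if t and not any(r in t.lower() for r in remove_classes):
--                 classes.append(t)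
--         else:
--             tok.append(ch)
--     # add phase: membership tracked in a hash set instead of scanning the list
--     seen = set(classes)
--     for c in add_classes:
--         if c not in seen:
--             seen.add(c)
--             classes.append(c)
--     return classes
-- ===== Notes on version B (the rewrite author's own statement) =====
-- stated objective: alternative
-- what changed: A's staged list pipeline (split, a strip pass, an empty-filter pass, 44 per-keyword removal passes, then an add loop scanning the list for membership) is replaced by a single character-level scan of the prompt that tokenizes on the dot separator and strips/filters each token the moment it is completed, plus an add loop whose membership test uses a hash set instead of rescanning the class list.
import Mathlib
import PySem

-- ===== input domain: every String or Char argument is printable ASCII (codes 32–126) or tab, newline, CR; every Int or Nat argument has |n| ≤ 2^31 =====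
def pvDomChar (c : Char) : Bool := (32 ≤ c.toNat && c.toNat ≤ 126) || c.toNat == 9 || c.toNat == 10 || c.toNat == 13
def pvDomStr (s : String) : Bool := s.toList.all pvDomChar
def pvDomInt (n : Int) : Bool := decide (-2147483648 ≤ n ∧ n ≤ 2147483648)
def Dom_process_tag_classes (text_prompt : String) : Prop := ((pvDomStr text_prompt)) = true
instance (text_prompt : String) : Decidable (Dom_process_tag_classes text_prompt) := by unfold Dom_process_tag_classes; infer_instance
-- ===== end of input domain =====

-- B replaces A's list pipeline (split, strip pass, empty-filter pass, 44 removal passes)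
-- by a single character-level scan that emits each accepted token as it is completed, and
-- tracks the add-phase membership in a set instead of scanning the list (objective: alternative).

-- shared literal constants from the Python source
def pvAddClasses : List String := ["picture","handle", "Bottled Coke", "Canned Beer", "apple", "potato", "green toy", "blue bottle", "green container", "blue and grey umbrella", "blue toy", "pen", "orange", "eggplant", "yellow bottle", "corn", "chili pepper", "small scissors", "keys", "green container", "cabinet", "long table", "big table", "plate"]
def pvRemoveClasses : List String := ["room", "kitchen", "office", "house", "home", "building", "corner", "shadow", "carpet", "photo", "shade", "stall", "space", "aquarium", "apartment", "image", "city", "blue", "skylight", "hallway", "bureau", "modern", "salon", "doorway", "wall lamp", "wood floor", "floor", "ladder", "sink", "counter top", "hardwood", "shower curtain", "curtain", "slide", "peak", "closet", "man", "woman", "child", "boy", "girl", "person", "human", "drawer"]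

-- ===== PORT A =====
def process_tag_classes (text_prompt : String) : List String :=
  let classes := ((PySem.Str.split? text_prompt ".").getD [])
  let classes := classes.map (fun oc => PySem.Str.strip oc)
  let classes := classes.filter (fun oc => !(oc == ""))
  let classes := pvRemoveClasses.foldl
    (fun acc c => acc.filter (fun oc => !(PySem.Str.isIn c (PySem.Str.lower oc)))) classes
  pvAddClasses.foldl (fun acc c => if acc.contains c then acc else acc ++ [c]) classes

-- ===== PORT B =====
-- Source B's token test: `t and not any(r in t.lower() for r in remove_classes)`
def pvKeepB (t : String) : Bool :=
  (!(t == "")) && !(pvRemoveClasses.any (fun r => PySem.Str.isIn r (PySem.Str.lower t)))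

-- one step of Source B's character scan: state = (classes so far, current token's chars)
def pvStepB (st : List String × List Char) (ch : Char) : List String × List Char :=
  if ch == '.' then
    let t := PySem.Str.strip (String.ofList st.2)
    if pvKeepB t then (st.1 ++ [t], []) else (st.1, [])
  else (st.1, st.2 ++ [ch])

def process_tag_classes_alt (text_prompt : String) : List String :=
  let classes := ((text_prompt.toList ++ ['.']).foldl pvStepB ([], [])).1
  let seen : PySem.Set String := PySem.Set.ofList classes
  (pvAddClasses.foldl
    (fun st c => if PySem.Set.contains st.2 c then st else (st.1 ++ [c], PySem.Set.add st.2 c))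
    (classes, seen)).1

-- ===== PRECONDITION & SPEC =====
def Spec_process_tag_classes (text_prompt : String) (out : List String) : Prop := out = process_tag_classes_alt text_prompt
instance (text_prompt : String) (out : List String) : Decidable (Spec_process_tag_classes text_prompt out) := by unfold Spec_process_tag_classes; infer_instance

-- ===== CLAIM (what is proved, stated in full; the proofs are below) =====
def Claim_equal_process_tag_classes : Prop := ∀ (text_prompt : String), Dom_process_tag_classes text_prompt → Spec_process_tag_classes text_prompt (process_tag_classes text_prompt)

-- ===== LEMMAS AND PROOFS =====

-- structural splitting on '.' with a reversed current-piece accumulator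
def pvSplitAux : List Char → List Char → List (List Char)
  | [], cur => [cur.reverse]
  | c :: rest, cur => if c = '.' then cur.reverse :: pvSplitAux rest [] else pvSplitAux rest (c :: cur)

-- the emission B performs when a token is completed
def pvEmit (cs : List Char) : List String :=
  let t := PySem.Str.strip (String.ofList cs)
  if pvKeepB t then [t] else []

-- PySem's fuelled split worker computes pvSplitAux
lemma go_eq : ∀ (fuel : Nat) (l cur : List Char) (acc : List (List Char)), l.length < fuel →
    PySem.Chars.splitOn.go ['.'] fuel l cur acc = acc.reverse ++ pvSplitAux l cur := by
  intro fuel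
  induction fuel with
  | zero => intro l cur acc h; omega
  | succ n ih =>
    intro l cur acc h
    cases l with
    | nil =>
      rw [PySem.Chars.splitOn.go]
      simp [pvSplitAux]
      omega
    | cons c rest =>
      rw [PySem.Chars.splitOn.go]
      by_cases hc : c = '.'
      · subst hc
        simp only [List.isPrefixOf, Bool.and_true, beq_self_eq_true, if_pos]
        rw [show List.drop ['.'].length ('.' :: rest) = rest from rfl]
        rw [ih rest [] (cur.reverse :: acc) (by simpa using Nat.lt_of_succ_lt_succ h)]
        simp [pvSplitAux]
      · have : (['.'].isPrefixOf (c :: rest)) = false := by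
          simp [List.isPrefixOf]; exact fun hh => hc hh.symm
        rw [this]
        simp only [Bool.false_eq_true, if_false]
        rw [ih rest (c :: cur) acc (by simpa using Nat.lt_of_succ_lt_succ h)]
        simp [pvSplitAux, hc]

-- B's character scan = emit every piece of the '.'-split
lemma scan_eq : ∀ (l tok : List Char) (classes : List String),
    ((l ++ ['.']).foldl pvStepB (classes, tok)).1
      = classes ++ (pvSplitAux l tok.reverse).flatMap pvEmit := by
  intro l
  induction l with
  | nil =>
    intro tok classes
    by_cases hk : pvKeepB (PySem.Str.strip (String.ofList tok)) <;>
      simp [pvStepB, pvEmit, pvSplitAux, hk]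
  | cons c rest ih =>
    intro tok classes
    by_cases hc : c = '.'
    · subst hc
      show ((('.' :: rest) ++ ['.']).foldl pvStepB (classes, tok)).1 = _
      rw [List.cons_append, List.foldl_cons]
      have hstep : pvStepB (classes, tok) '.' = (classes ++ pvEmit tok, []) := by
        by_cases hk : pvKeepB (PySem.Str.strip (String.ofList tok)) <;>
          simp [pvStepB, pvEmit, hk]
      rw [hstep, ih [] (classes ++ pvEmit tok)]
      simp [pvSplitAux]
    · show (((c :: rest) ++ ['.']).foldl pvStepB (classes, tok)).1 = _
      rw [List.cons_append, List.foldl_cons]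
      have hstep : pvStepB (classes, tok) c = (classes, tok ++ [c]) := by
        simp [pvStepB, hc]
      rw [hstep, ih (tok ++ [c]) classes]
      simp [pvSplitAux, hc]

-- strip-map + the two fused filters = emitting each piece's token
lemma pipeline_eq : ∀ ps : List (List Char),
    ((ps.map ((fun oc => PySem.Str.strip oc) ∘ String.ofList)).filter
      (fun oc => (!(pvRemoveClasses.any (fun c => PySem.Str.isIn c (PySem.Str.lower oc)))) && !(oc == "")))
      = ps.flatMap pvEmit := by
  intro ps
  induction ps with
  | nil => rfl
  | cons cs ps ih =>
    simp only [List.map_cons, Function.comp_apply, List.filter_cons, List.flatMap_cons, ih, pvEmit]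
    cases h : pvKeepB (PySem.Str.strip (String.ofList cs))
    · simp [pvKeepB] at h
      simp
      intro hall
      by_contra hne
      rcases h hne with ⟨x, hx, ht⟩
      simp [hall x hx] at ht
    · simp [pvKeepB] at h
      simp [h]
      exact h.2

-- A's 44 sequential removal passes collapse into one filter
lemma foldl_filter_eq_filter_any (p : String → String → Bool) :
    ∀ (cs l : List String),
    cs.foldl (fun acc c => acc.filter (fun oc => !(p c oc))) l
      = l.filter (fun oc => !(cs.any (fun c => p c oc))) := by
  intro cs
  induction cs with
  | nil => intro l; simp
  | cons c cs ih =>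
    intro l
    simp only [List.foldl_cons, ih, List.filter_filter, List.any_cons, Bool.not_or]
    congr 1
    funext oc
    exact Bool.and_comm _ _

-- B's set-tracked add loop = A's list-membership add loop, given membership agrees
lemma add_eq : ∀ (adds classes seen : List String),
    (∀ x, x ∈ seen ↔ x ∈ classes) →
    (adds.foldl
      (fun st c => if PySem.Set.contains st.2 c then st else (st.1 ++ [c], PySem.Set.add st.2 c))
      (classes, seen)).1
    = adds.foldl (fun acc c => if acc.contains c then acc else acc ++ [c]) classes := by
  intro adds
  induction adds with
  | nil => intro classes seen h; rfl
  | cons a adds ih =>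
    intro classes seen h
    simp only [List.foldl_cons]
    by_cases ha : a ∈ classes
    · rw [if_pos (show PySem.Set.contains seen a = true from
            List.contains_iff_mem.mpr ((h a).mpr ha)),
          if_pos (List.contains_iff_mem.mpr ha)]
      exact ih classes seen h
    · rw [if_neg (show ¬ PySem.Set.contains seen a = true from
            fun hc => ha ((h a).mp (List.contains_iff_mem.mp hc))),
          if_neg (fun hc => ha (List.contains_iff_mem.mp hc))]
      exact ih (classes ++ [a]) (PySem.Set.add seen a)
        (fun x => by rw [PySem.Set.mem_add]; simp [h x])

-- ===== VERDICT (by name: the statement is the Claim_ definition above) =====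
theorem process_tag_classes_spec : Claim_equal_process_tag_classes := by
  intro text_prompt _
  unfold Spec_process_tag_classes
  -- pre-add classes agree
  have hpieces : (PySem.Str.split? text_prompt ".").getD []
      = (pvSplitAux text_prompt.toList []).map String.ofList := by
    have hd : ".".toList = ['.'] := by decide
    simp only [PySem.Str.split?, PySem.Chars.split?, PySem.Chars.splitOn, hd]
    rw [go_eq _ _ _ _ (by simp)]
    simp
  have hscan : ((text_prompt.toList ++ ['.']).foldl pvStepB ([], [])).1
      = (pvSplitAux text_prompt.toList []).flatMap pvEmit := by
    simpa using scan_eq text_prompt.toList [] []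
  have hpre :
      pvRemoveClasses.foldl
        (fun acc c => acc.filter (fun oc => !(PySem.Str.isIn c (PySem.Str.lower oc))))
        ((((PySem.Str.split? text_prompt ".").getD []).map (fun oc => PySem.Str.strip oc)).filter
          (fun oc => !(oc == "")))
      = ((text_prompt.toList ++ ['.']).foldl pvStepB ([], [])).1 := by
    rw [hscan, hpieces, foldl_filter_eq_filter_any, List.filter_filter, List.map_map,
      pipeline_eq]
  rw [show process_tag_classes text_prompt
        = pvAddClasses.foldl (fun acc c => if acc.contains c then acc else acc ++ [c])
            (pvRemoveClasses.foldl
              (fun acc c => acc.filter (fun oc => !(PySem.Str.isIn c (PySem.Str.lower oc))))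
              ((((PySem.Str.split? text_prompt ".").getD []).map
                  (fun oc => PySem.Str.strip oc)).filter (fun oc => !(oc == "")))) from rfl]
  rw [show process_tag_classes_alt text_prompt
        = (pvAddClasses.foldl
            (fun st c => if PySem.Set.contains st.2 c then st
              else (st.1 ++ [c], PySem.Set.add st.2 c))
            (((text_prompt.toList ++ ['.']).foldl pvStepB ([], [])).1,
              PySem.Set.ofList (((text_prompt.toList ++ ['.']).foldl pvStepB ([], [])).1))).1
      from rfl]
  rw [hpre]
  exact (add_eq pvAddClasses _ _ (fun x => PySem.Set.mem_ofList _ x)).symm
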